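-- pv_equiv track=rewrite | github.com/DS-argus/AR_Algorithm | qualifying/2303/Q1.py | create_adj_dic
-- ===== SOURCE A (Python) =====
-- def create_adj_dic(s: str) -> dict:
--
--     adj_dic = dict()
--
--     for i in range(len(s)):
--         if s[i] not in adj_dic.keys():
--             adj_dic[s[i]] = set()
--
--         if i > 0:
--             adj_dic[s[i]].add(s[i-1])
--
--         if i < len(s)-1:
--             adj_dic[s[i]].add(s[i+1])
--
--     return adj_dic
-- ===== SOURCE B (Python) =====
-- def create_adj_dic(s: str) -> dict:
--     n = len(s)
--     return {c: {s[j] for i in range(n) if s[i] == c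
--                      for j in (i - 1, i + 1) if 0 <= j < n}
--             for c in dict.fromkeys(s)}
-- ===== Notes on version B (the rewrite author's own statement) =====
-- stated objective: alternative
-- what changed: Replaces A's single stateful pass that mutates a growing dict with an output-directed dict comprehension: keys come from dict.fromkeys(s) and each key's neighbour set is computed independently by scanning all positions of that character.
import Mathlib
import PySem

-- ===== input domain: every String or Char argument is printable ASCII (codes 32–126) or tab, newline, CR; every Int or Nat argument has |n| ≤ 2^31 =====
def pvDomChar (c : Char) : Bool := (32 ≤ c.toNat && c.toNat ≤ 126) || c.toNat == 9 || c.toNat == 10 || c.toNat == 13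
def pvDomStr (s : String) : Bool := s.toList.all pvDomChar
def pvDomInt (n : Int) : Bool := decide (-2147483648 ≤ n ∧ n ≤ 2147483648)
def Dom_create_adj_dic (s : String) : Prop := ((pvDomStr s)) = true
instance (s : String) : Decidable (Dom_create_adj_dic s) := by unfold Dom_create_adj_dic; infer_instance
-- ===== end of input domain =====

-- B replaces A's single stateful pass over a growing dict by an output-directed comprehension:
-- keys from dict.fromkeys(s), each key's neighbour set computed by its own scan of all positions
-- (alternative decomposition; same return value).

-- shared type plumbing: render the Char-keyed dict of Char-sets as the required String-typed output
def pvRender (d : PySem.Dict Char (PySem.Set Char)) : List (String × List String) :=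
  d.items.map (fun p => (String.ofList [p.1], p.2.map (fun c => String.ofList [c])))

-- ===== PORT A =====
-- the loop body of A's 'for i in range(len(s))'
def pvBodyA (cs : List Char) (d : PySem.Dict Char (PySem.Set Char)) (i : Int) :
    PySem.Dict Char (PySem.Set Char) :=
  let c := PySem.List.pyGetD cs i ' '
  let d := if d.contains c then d else d.insert c PySem.Set.empty
  let d := if 0 < i then
      d.modify c PySem.Set.empty (fun st => PySem.Set.add st (PySem.List.pyGetD cs (i - 1) ' '))
    else d
  let d := if i < (cs.length : Int) - 1 then
      d.modify c PySem.Set.empty (fun st => PySem.Set.add st (PySem.List.pyGetD cs (i + 1) ' '))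
    else d
  d

def create_adj_dic (s : String) : List (String × List String) :=
  let cs := s.toList
  let d := (PySem.List.pyRange 0 (cs.length : Int) 1).foldl (pvBodyA cs) PySem.Dict.empty
  pvRender d

-- ===== PORT B =====
-- the set comprehension {s[j] for i in range(n) if s[i] == c for j in (i-1, i+1) if 0 <= j < n}
def pvNbrSet (cs : List Char) (c : Char) : PySem.Set Char :=
  (PySem.List.pyRange 0 (cs.length : Int) 1).foldl (fun st i =>
    if PySem.List.pyGetD cs i ' ' == c then
      ([i - 1, i + 1] : List Int).foldl (fun st j =>
        if 0 ≤ j ∧ j < (cs.length : Int) then PySem.Set.add st (PySem.List.pyGetD cs j ' ')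
        else st) st
    else st) PySem.Set.empty

-- {c: {…} for c in dict.fromkeys(s)}  (dict.fromkeys(s) iterated = ordered dedup, PySem.List.dedup)
def create_adj_dic_alt (s : String) : List (String × List String) :=
  let cs := s.toList
  (PySem.List.dedup cs).map (fun c =>
    (String.ofList [c], (pvNbrSet cs c).map (fun x => String.ofList [x])))

-- ===== PRECONDITION & SPEC =====
def Spec_create_adj_dic (s : String) (out : List (String × List String)) : Prop := out = create_adj_dic_alt s
instance (s : String) (out : List (String × List String)) : Decidable (Spec_create_adj_dic s out) := by unfold Spec_create_adj_dic; infer_instance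

-- ===== CLAIM (what is proved, stated in full; the proofs are below) =====
def Claim_equal_create_adj_dic : Prop := ∀ (s : String), Dom_create_adj_dic s → Spec_create_adj_dic s (create_adj_dic s)

-- ===== LEMMAS AND PROOFS =====

-- ensure a key exists with an empty set (A's first 'if')
def pvE (d : PySem.Dict Char (PySem.Set Char)) (c : Char) : PySem.Dict Char (PySem.Set Char) :=
  if d.contains c then d else d.insert c PySem.Set.empty

-- add x into the set stored at key c
def pvM (d : PySem.Dict Char (PySem.Set Char)) (c x : Char) : PySem.Dict Char (PySem.Set Char) :=
  d.modify c PySem.Set.empty (fun st => PySem.Set.add st x)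

-- A's loop as a structural recursion over the characters, carrying the previous char
def pvG (prev : Option Char) (cs : List Char) (d : PySem.Dict Char (PySem.Set Char)) :
    PySem.Dict Char (PySem.Set Char) :=
  match cs with
  | [] => d
  | c :: rest =>
    let d := pvE d c
    let d := match prev with | some p => pvM d c p | none => d
    let d := match rest with | r :: _ => pvM d c r | [] => d
    pvG (some c) rest d

def pvEnsureAll (cs : List Char) (d : PySem.Dict Char (PySem.Set Char)) :
    PySem.Dict Char (PySem.Set Char) := cs.foldl pvE d

def pvApply (l : List (Char × Char)) (d : PySem.Dict Char (PySem.Set Char)) :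
    PySem.Dict Char (PySem.Set Char) := l.foldl (fun d p => pvM d p.1 p.2) d

-- the add operations A performs, in order
def pvOpsG (prev : Option Char) (cs : List Char) : List (Char × Char) :=
  match cs with
  | [] => []
  | c :: rest =>
    (match prev with | some p => [(c, p)] | none => []) ++
    (match rest with | r :: _ => [(c, r)] | [] => []) ++
    pvOpsG (some c) rest

-- the operations contributed at index i (back edge, then forward edge)
def pvContrib (cs : List Char) (i : Nat) : List (Char × Char) :=
  (if 0 < i then [(cs.getD i ' ', cs.getD (i - 1) ' ')] else []) ++
  (if i + 1 < cs.length then [(cs.getD i ' ', cs.getD (i + 1) ' ')] else [])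

-- the same operation list as A's, written by index (the shape B's scans read off)
def pvOpsIdx (cs : List Char) : List (Char × Char) :=
  (List.range cs.length).flatMap (pvContrib cs)

-- the 'add previous neighbour' step, guarded like A's 'if i > 0'
def pvMprev (cs : List Char) (k : Nat) (hlt : k < cs.length)
    (d : PySem.Dict Char (PySem.Set Char)) : PySem.Dict Char (PySem.Set Char) :=
  if h : k = 0 then d else pvM d cs[k] (cs[k - 1]'(by omega))

theorem pvE_contains_of (d : PySem.Dict Char (PySem.Set Char)) (c k : Char)
    (h : d.contains k = true) : (pvE d c).contains k = true := by
  unfold pvE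
  split
  · exact h
  · simp [PySem.Dict.contains_insert, h]

theorem pvE_contains_self (d : PySem.Dict Char (PySem.Set Char)) (c : Char) :
    (pvE d c).contains c = true := by
  unfold pvE
  split
  · assumption
  · simp

theorem pv_insert_comm (d : PySem.Dict Char (PySem.Set Char)) (k c : Char) (v : PySem.Set Char)
    (hk : d.contains k = true) (hcf : d.contains c = false) :
    (d.insert k v).insert c PySem.Set.empty
      = (d.insert c PySem.Set.empty).insert k v := by
  have hck : c ≠ k := by rintro rfl; rw [hk] at hcf; exact absurd hcf (by simp)
  apply PySem.Dict.ext
  rw [PySem.Dict.items_insert_of_not_contains _ _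
      (show (d.insert k v).contains c = false by
        simp [PySem.Dict.contains_insert, hcf, hck]),
    PySem.Dict.items_insert_of_contains _ _ hk,
    PySem.Dict.items_insert_of_contains _ _
      (show (d.insert c PySem.Set.empty).contains k = true by
        simp [PySem.Dict.contains_insert, hk]),
    PySem.Dict.items_insert_of_not_contains _ _ hcf, List.map_append]
  simp [hck]

theorem pvM_contains (d : PySem.Dict Char (PySem.Set Char)) (k x j : Char)
    (h : d.contains j = true) : (pvM d k x).contains j = true := by
  unfold pvM; rw [PySem.Dict.contains_modify]; simp [h]

theorem pvE_pvM_comm (d : PySem.Dict Char (PySem.Set Char)) (k x c : Char)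
    (hk : d.contains k = true) : pvE (pvM d k x) c = pvM (pvE d c) k x := by
  by_cases hc : d.contains c = true
  · have h1 : (pvM d k x).contains c = true := pvM_contains d k x c hc
    unfold pvE
    rw [if_pos hc, if_pos h1]
  · have hcf : d.contains c = false := by simpa using hc
    have hck : c ≠ k := by rintro rfl; rw [hk] at hcf; exact absurd hcf (by simp)
    unfold pvE pvM PySem.Dict.modify
    rw [if_neg (show ¬ (d.insert k ((d.getD k PySem.Set.empty).add x)).contains c = true by
        simp [PySem.Dict.contains_insert, hcf, hck]),
      if_neg (by rw [hcf]; simp),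
      PySem.Dict.getD_insert_of_ne _ _ _ (Ne.symm hck)]
    exact pv_insert_comm d k c _ hk hcf

theorem pvEnsureAll_pvM_comm (cs : List Char) (d : PySem.Dict Char (PySem.Set Char)) (k x : Char)
    (hk : d.contains k = true) : pvEnsureAll cs (pvM d k x) = pvM (pvEnsureAll cs d) k x := by
  induction cs generalizing d with
  | nil => rfl
  | cons c rest ih =>
    show pvEnsureAll rest (pvE (pvM d k x) c) = pvM (pvEnsureAll rest (pvE d c)) k x
    rw [pvE_pvM_comm d k x c hk, ih _ (pvE_contains_of d c k hk)]

theorem pvG_eq (cs : List Char) (prev : Option Char) (d : PySem.Dict Char (PySem.Set Char)) :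
    pvG prev cs d = pvApply (pvOpsG prev cs) (pvEnsureAll cs d) := by
  induction cs generalizing prev d with
  | nil => rfl
  | cons c rest ih =>
    show pvG (some c) rest _ = pvApply (_ ++ _ ++ pvOpsG (some c) rest) (pvEnsureAll rest (pvE d c))
    rw [ih]
    unfold pvApply
    rw [List.foldl_append, List.foldl_append]
    have hc : (pvE d c).contains c = true := pvE_contains_self d c
    cases prev with
    | none =>
      cases rest with
      | nil => rfl
      | cons r rest' =>
        simp only [List.foldl_nil, List.foldl_cons]
        rw [pvEnsureAll_pvM_comm _ _ _ _ hc]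
    | some p =>
      cases rest with
      | nil =>
        simp only [List.foldl_nil, List.foldl_cons]
        rw [pvEnsureAll_pvM_comm _ _ _ _ hc]
      | cons r rest' =>
        simp only [List.foldl_nil, List.foldl_cons]
        rw [pvEnsureAll_pvM_comm _ _ _ _ (pvM_contains _ _ _ _ hc), pvEnsureAll_pvM_comm _ _ _ _ hc]

-- one unfolding step of pvG on a cons
theorem pvG_cons (prev : Option Char) (c : Char) (rest : List Char)
    (d : PySem.Dict Char (PySem.Set Char)) :
    pvG prev (c :: rest) d =
      pvG (some c) rest
        (match rest with
         | r :: _ => pvM (match prev with | some p => pvM (pvE d c) c p | none => pvE d c) c r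
         | [] => (match prev with | some p => pvM (pvE d c) c p | none => pvE d c)) := by
  cases prev <;> cases rest <;> rfl

-- one step of A's index loop, expressed over Nat indices
theorem pvBodyA_step (cs : List Char) (k : Nat) (hlt : k < cs.length)
    (d : PySem.Dict Char (PySem.Set Char)) :
    pvBodyA cs d (k : Int) =
      (if h1 : k + 1 < cs.length then pvM (pvMprev cs k hlt (pvE d cs[k])) cs[k] cs[k + 1]
       else pvMprev cs k hlt (pvE d cs[k])) := by
  have hg : PySem.List.pyGetD cs (k : Int) ' ' = cs[k] := by
    rw [PySem.List.pyGetD_eq_getElem _ _ (by positivity) (by exact_mod_cast hlt)]; simp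
  unfold pvBodyA pvE pvM pvMprev PySem.Dict.modify
  simp only [hg]
  by_cases h0 : k = 0
  · subst h0
    rw [if_neg (show ¬ (0 : Int) < ((0 : Nat) : Int) by norm_num), dif_pos rfl]
    by_cases h1 : 0 + 1 < cs.length
    · have hg1 : PySem.List.pyGetD cs (((0 : Nat) : Int) + 1) ' ' = cs[0 + 1] := by
        rw [show (((0 : Nat) : Int) + 1) = ((0 + 1 : Nat) : Int) by norm_num,
          PySem.List.pyGetD_eq_getElem _ _ (by positivity) (by exact_mod_cast h1)]
        simp
      rw [if_pos (show ((0 : Nat) : Int) < (cs.length : Int) - 1 by push_cast; omega),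
        dif_pos h1, hg1]
    · rw [if_neg (show ¬ ((0 : Nat) : Int) < (cs.length : Int) - 1 by push_cast; omega),
        dif_neg h1]
  · have hgm : PySem.List.pyGetD cs ((k : Int) - 1) ' ' = cs[k - 1]'(by omega) := by
      rw [show ((k : Int) - 1) = ((k - 1 : Nat) : Int) by omega,
        PySem.List.pyGetD_eq_getElem _ _ (by positivity)
          (by exact_mod_cast (show k - 1 < cs.length by omega))]
      simp
    rw [if_pos (show (0 : Int) < (k : Int) by omega), dif_neg h0, hgm]
    by_cases h1 : k + 1 < cs.length
    · have hg1 : PySem.List.pyGetD cs ((k : Int) + 1) ' ' = cs[k + 1] := by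
        rw [show ((k : Int) + 1) = ((k + 1 : Nat) : Int) by omega,
          PySem.List.pyGetD_eq_getElem _ _ (by positivity) (by exact_mod_cast h1)]
        simp
      rw [if_pos (show (k : Int) < (cs.length : Int) - 1 by omega), dif_pos h1, hg1]
      rfl
    · rw [if_neg (show ¬ (k : Int) < (cs.length : Int) - 1 by omega), dif_neg h1]
      rfl

-- the index fold of port A is the structural recursion pvG
theorem pvFoldA_eq (cs : List Char) (k : Nat) (d : PySem.Dict Char (PySem.Set Char))
    (hk : k ≤ cs.length) :
    (PySem.List.pyRange (k : Int) (cs.length : Int) 1).foldl (pvBodyA cs) d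
      = pvG (if h : k = 0 then none else some (cs[k - 1]'(by omega))) (cs.drop k) d := by
  induction hm : cs.length - k generalizing k d with
  | zero =>
    have hke : k = cs.length := by omega
    subst hke
    rw [PySem.List.pyRange_one_eq_nil le_rfl, List.drop_length]
    rfl
  | succ m ihm =>
    have hlt : k < cs.length := by omega
    rw [PySem.List.pyRange_one_cons (by exact_mod_cast hlt), List.foldl_cons,
      pvBodyA_step cs k hlt d]
    have hk1 : (k : Int) + 1 = ((k + 1 : Nat) : Int) := by push_cast; ring
    rw [hk1, ihm (k + 1) _ (by omega) (by omega), dif_neg (Nat.succ_ne_zero k)]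
    simp only [Nat.add_sub_cancel]
    conv_rhs => rw [List.drop_eq_getElem_cons hlt, pvG_cons]
    congr 1
    by_cases h1 : k + 1 < cs.length
    · rw [dif_pos h1]
      conv_rhs => rw [List.drop_eq_getElem_cons h1]
      by_cases h0 : k = 0
      · subst h0
        rw [show pvMprev cs 0 hlt (pvE d cs[0]) = pvE d cs[0] from dif_pos rfl]
        rfl
      · rw [show pvMprev cs k hlt (pvE d cs[k]) = pvM (pvE d cs[k]) cs[k] (cs[k - 1]'(by omega))
            from dif_neg h0]
        simp only [dif_neg h0]
    · rw [dif_neg h1, List.drop_eq_nil_iff.mpr (by omega)]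
      by_cases h0 : k = 0
      · subst h0
        rw [show pvMprev cs 0 hlt (pvE d cs[0]) = pvE d cs[0] from dif_pos rfl]
        rfl
      · rw [show pvMprev cs k hlt (pvE d cs[k]) = pvM (pvE d cs[k]) cs[k] (cs[k - 1]'(by omega))
            from dif_neg h0]
        simp only [dif_neg h0]

-- === new B-side development ===

-- one unfolding step of pvOpsG on a cons
theorem pvOpsG_cons (prev : Option Char) (c : Char) (rest : List Char) :
    pvOpsG prev (c :: rest) =
      ((match prev with | some p => [(c, p)] | none => []) ++
       (match rest with | r :: _ => [(c, r)] | [] => [])) ++ pvOpsG (some c) rest := by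
  cases prev <;> cases rest <;> rfl

-- the suffix of the indexed ops list equals A's prev-carrying ops list on the dropped suffix
theorem pvOpsIdx_drop (cs : List Char) (k : Nat) (hk : k ≤ cs.length) :
    (List.range' k (cs.length - k)).flatMap (pvContrib cs)
      = pvOpsG (if h : k = 0 then none else some (cs[k - 1]'(by omega))) (cs.drop k) := by
  induction hm : cs.length - k generalizing k with
  | zero =>
    have hke : k = cs.length := by omega
    subst hke
    rw [List.drop_length]
    rfl
  | succ m ihm =>
    have hlt : k < cs.length := by omega
    have htail := ihm (k + 1) (by omega) (by omega)
    rw [dif_neg (Nat.succ_ne_zero k)] at htail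
    simp only [Nat.add_sub_cancel] at htail
    rw [List.range'_succ, List.flatMap_cons, htail]
    conv_rhs => rw [List.drop_eq_getElem_cons hlt, pvOpsG_cons]
    congr 1
    unfold pvContrib
    have ek : cs[k]? = some cs[k] := List.getElem?_eq_getElem hlt
    by_cases h1 : k + 1 < cs.length
    · rw [List.drop_eq_getElem_cons h1]
      have e1 : cs[k + 1]? = some cs[k + 1] := List.getElem?_eq_getElem h1
      by_cases h0 : k = 0
      · subst h0
        have h1' : 1 < cs.length := by omega
        simp [List.getD_eq_getElem?_getD, ek, h1']
      · have em : cs[k - 1]? = some (cs[k - 1]'(by omega)) :=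
          List.getElem?_eq_getElem (by omega)
        have hk0 : 0 < k := by omega
        rw [dif_neg h0]
        simp [hk0, h1, List.getD_eq_getElem?_getD, ek, em]
    · rw [List.drop_eq_nil_iff.mpr (by omega)]
      by_cases h0 : k = 0
      · subst h0
        simp [h1]
      · have em : cs[k - 1]? = some (cs[k - 1]'(by omega)) :=
          List.getElem?_eq_getElem (by omega)
        have hk0 : 0 < k := by omega
        rw [dif_neg h0]
        simp [hk0, h1, List.getD_eq_getElem?_getD, ek, em]

-- the ops list written by index equals A's prev-carrying ops list
theorem pvOpsIdx_eq (cs : List Char) : pvOpsIdx cs = pvOpsG none cs := by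
  have h := pvOpsIdx_drop cs 0 (Nat.zero_le _)
  rw [dif_pos rfl, List.drop_zero, Nat.sub_zero, ← List.range_eq_range'] at h
  exact h

-- keys of pvEnsureAll
theorem pvE_keys (d : PySem.Dict Char (PySem.Set Char)) (c : Char) :
    (pvE d c).keys = PySem.Set.add d.keys c := by
  unfold pvE
  rw [PySem.Set.add_eq_ite]
  by_cases hc : d.contains c = true
  · rw [if_pos hc, if_pos ((PySem.Dict.contains_iff_mem_keys d c).mp hc)]
  · have hcf : d.contains c = false := by simpa using hc
    rw [if_neg (by simpa using hc), PySem.Dict.keys_insert_of_not_contains _ _ hcf,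
      if_neg (fun hm => by rw [(PySem.Dict.contains_iff_mem_keys d c).mpr hm] at hcf; cases hcf)]

theorem pvEnsureAll_keys (cs : List Char) (d : PySem.Dict Char (PySem.Set Char)) :
    (pvEnsureAll cs d).keys = PySem.Set.update d.keys cs := by
  induction cs generalizing d with
  | nil => rfl
  | cons c rest ih =>
    show (pvEnsureAll rest (pvE d c)).keys = PySem.Set.update d.keys (c :: rest)
    rw [ih, pvE_keys, PySem.Set.update_cons]

-- every value stored by pvEnsureAll from empty is the empty set
theorem pvEnsureAll_getD (cs : List Char) (d : PySem.Dict Char (PySem.Set Char)) (c : Char)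
    (h : ∀ x, d.getD x PySem.Set.empty = PySem.Set.empty) :
    (pvEnsureAll cs d).getD c PySem.Set.empty = PySem.Set.empty := by
  induction cs generalizing d with
  | nil => exact h c
  | cons a rest ih =>
    show (pvEnsureAll rest (pvE d a)).getD c PySem.Set.empty = PySem.Set.empty
    refine ih _ (fun x => ?_)
    unfold pvE
    split
    · exact h x
    · rw [PySem.Dict.getD_insert]
      split
      · rfl
      · exact h x

-- lookups through pvApply: the per-key fold over the filtered op list
theorem pvApply_getD (l : List (Char × Char)) (d : PySem.Dict Char (PySem.Set Char)) (c : Char) :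
    (pvApply l d).getD c PySem.Set.empty
      = ((l.filter (fun p => p.1 == c)).map (·.2)).foldl PySem.Set.add
          (d.getD c PySem.Set.empty) := by
  induction l generalizing d with
  | nil => rfl
  | cons p rest ih =>
    show (pvApply rest (pvM d p.1 p.2)).getD c PySem.Set.empty = _
    rw [ih]
    unfold pvM
    rw [List.filter_cons]
    by_cases hp : p.1 = c
    · subst hp
      rw [if_pos (by simp), List.map_cons, List.foldl_cons,
        PySem.Dict.getD_modify, if_pos rfl]
    · rw [if_neg (by simpa using hp), PySem.Dict.getD_modify,
        if_neg (fun hh => hp hh.symm)]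

-- every op key lies in cs
theorem pvOpsIdx_keys_mem (cs : List Char) (p : Char × Char) (hp : p ∈ pvOpsIdx cs) :
    p.1 ∈ cs := by
  obtain ⟨i, hi, hmem⟩ := List.mem_flatMap.mp hp
  have hil : i < cs.length := List.mem_range.mp hi
  have hkey : p.1 = cs.getD i ' ' := by
    unfold pvContrib at hmem
    rcases List.mem_append.mp hmem with h | h <;> split at h <;> simp_all
  rw [hkey, List.getD_eq_getElem cs ' ' hil]
  exact List.getElem_mem hil

-- B's per-key scan computes the fold of the filtered op list
theorem pvNbrSet_eq (cs : List Char) (c : Char) :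
    pvNbrSet cs c
      = (((pvOpsIdx cs).filter (fun p => p.1 == c)).map (·.2)).foldl PySem.Set.add
          PySem.Set.empty := by
  have gen : ∀ m, m ≤ cs.length → ∀ st : PySem.Set Char,
      ((List.range m).map (fun k : Nat => (k : Int))).foldl (fun st i =>
        if PySem.List.pyGetD cs i ' ' == c then
          ([i - 1, i + 1] : List Int).foldl (fun st j =>
            if 0 ≤ j ∧ j < (cs.length : Int) then PySem.Set.add st (PySem.List.pyGetD cs j ' ')
            else st) st
        else st) st
      = ((((List.range m).flatMap (pvContrib cs)).filter (fun p => p.1 == c)).map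
          (·.2)).foldl PySem.Set.add st := by
    intro m hm
    induction m with
    | zero => intro st; rfl
    | succ n ih =>
      intro st
      rw [List.range_succ, List.map_append, List.foldl_append,
        ih (by omega), List.flatMap_append, List.filter_append, List.map_append,
        List.foldl_append]
      set st' := ((((List.range n).flatMap (pvContrib cs)).filter (fun p => p.1 == c)).map
          (·.2)).foldl PySem.Set.add st
      have hn : n < cs.length := by omega
      have hg : PySem.List.pyGetD cs ((n : Nat) : Int) ' ' = cs[n]?.getD ' ' := by
        rw [PySem.List.pyGetD_natCast, List.getD_eq_getElem?_getD]
      have hgm : 0 < n → PySem.List.pyGetD cs (((n : Nat) : Int) - 1) ' ' = cs[n - 1]?.getD ' ' := by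
        intro h0
        rw [show ((n : Nat) : Int) - 1 = (((n - 1 : Nat) : Nat) : Int) by omega,
          PySem.List.pyGetD_natCast, List.getD_eq_getElem?_getD]
      have hgp : PySem.List.pyGetD cs (((n : Nat) : Int) + 1) ' ' = cs[n + 1]?.getD ' ' := by
        rw [show ((n : Nat) : Int) + 1 = (((n + 1 : Nat) : Nat) : Int) by omega,
          PySem.List.pyGetD_natCast, List.getD_eq_getElem?_getD]
      have hcond1 : (0 ≤ ((n : Nat) : Int) - 1 ∧ ((n : Nat) : Int) - 1 < (cs.length : Int)) ↔ 0 < n := by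
        omega
      have hcond2 : (0 ≤ ((n : Nat) : Int) + 1 ∧ ((n : Nat) : Int) + 1 < (cs.length : Int)) ↔ n + 1 < cs.length := by
        omega
      simp only [List.map_cons, List.map_nil, List.foldl_cons, List.foldl_nil,
        List.flatMap_cons, List.flatMap_nil, List.append_nil, pvContrib,
        List.getD_eq_getElem?_getD, hg]
      by_cases hc : (cs[n]?.getD ' ' == c) = true
      · rw [if_pos hc]
        by_cases h0 : 0 < n
        · have hgm' := hgm h0
          by_cases h1 : n + 1 < cs.length <;>
            simp [hcond1, hcond2, h0, h1, hc, hgm', hgp,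
              (show 1 ≤ n ∧ n ≤ cs.length from ⟨h0, by omega⟩)]
        · have h0' : ¬ (1 ≤ n ∧ n ≤ cs.length) := fun h => h0 h.1
          by_cases h1 : n + 1 < cs.length <;>
            simp [hcond1, hcond2, h0, h0', h1, hc, hgp]
      · rw [if_neg hc]
        have hcne : (cs[n]?.getD ' ' == c) = false := by simpa using hc
        by_cases h0 : 0 < n <;> by_cases h1 : n + 1 < cs.length <;>
          simp [h0, h1, hcne]
  unfold pvNbrSet pvOpsIdx
  rw [PySem.List.pyRange_zero_natCast cs.length]
  exact gen cs.length le_rfl PySem.Set.empty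

-- ===== VERDICT (by name: the statement is the Claim_ definition above) =====
theorem create_adj_dic_spec : Claim_equal_create_adj_dic := by
  intro s _
  show create_adj_dic s = create_adj_dic_alt s
  unfold create_adj_dic create_adj_dic_alt
  dsimp only
  have hA := pvFoldA_eq s.toList 0 PySem.Dict.empty (by omega)
  simp only [Nat.cast_zero, List.drop_zero, dite_true] at hA
  rw [hA, pvG_eq, ← pvOpsIdx_eq]
  set cs := s.toList with hcs
  set D := pvApply (pvOpsIdx cs) (pvEnsureAll cs PySem.Dict.empty) with hD
  have hkeys : D.keys = PySem.Set.ofList cs := by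
    rw [hD]
    unfold pvApply
    simp only [pvM]
    rw [PySem.Dict.keys_foldl_modify_key (pvOpsIdx cs) (·.1) PySem.Set.empty
        (fun _ p => fun st => PySem.Set.add st p.2), pvEnsureAll_keys,
      PySem.Dict.keys_empty, PySem.Set.update_nil_left,
      PySem.Set.update_eq_append_filter]
    have : ((PySem.Set.ofList ((pvOpsIdx cs).map (·.1))).filter
        (fun y => !(PySem.Set.ofList cs).contains y)) = [] := by
      rw [List.filter_eq_nil_iff]
      intro a ha
      rw [PySem.Set.mem_ofList] at ha
      obtain ⟨p, hp, rfl⟩ := List.mem_map.mp ha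
      simp [PySem.Set.mem_ofList, pvOpsIdx_keys_mem cs p hp]
    rw [this, List.append_nil]
  have hnd : D.keys.Nodup := by rw [hkeys]; exact PySem.Set.nodup_ofList cs
  rw [pvRender, PySem.Dict.items_eq_map_keys D hnd PySem.Set.empty, hkeys, List.map_map]
  show _ = (PySem.List.dedup cs).map _
  rw [show PySem.List.dedup cs = PySem.Set.ofList cs from rfl]
  apply List.map_congr_left
  intro c _
  have hval : D.getD c PySem.Set.empty = pvNbrSet cs c := by
    rw [hD, pvApply_getD, pvEnsureAll_getD cs PySem.Dict.empty c
        (fun x => PySem.Dict.getD_empty x PySem.Set.empty), pvNbrSet_eq]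
  have hval' : D.getD c ([] : List Char) = pvNbrSet cs c := hval
  simp [Function.comp, hval']
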